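-- pv_equiv track=rewrite | github.com/maniospas/pySynthesis | analysis.py | get_possible_variables
-- ===== SOURCE A (Python) =====
-- from keyword import iskeyword
--
-- def _is_valid_variable(text):
--     if len(text)==0:
--         return False
--     for c in text:
--         if _is_not_var_symbol(c):
--             return False
--     return True
--
-- def _get_asignment_pos(text):
--     level = 0
--     for pos, c in enumerate(text):
--         if _is_left_parenthesis_symbol(c):
--             level += 1
--         if _is_right_parenthesis_symbol(c):
--             level -= 1
--         if level==0 and c=="=" and pos>0 and not _is_math_symbol(text[pos-1]) and pos<len(text)-1 and text[pos+1]!="=":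
--             return pos
--     return -1
--
-- def _is_math_symbol(text):
--     valid_symbols = "<>=!"
--     if text in valid_symbols:
--         return True
--     return False
--
-- def _is_not_var_symbol(text):
--     valid_symbols = ".,!@#$%^/&*()-+={}[]:\t=<> "
--     if text in valid_symbols:
--         return True
--     return False
--
-- def _is_left_parenthesis_symbol(text):
--     parenthesis_symbols = "({[\"'"
--     if text in parenthesis_symbols:
--         return True
--     return False
--
-- def _is_right_parenthesis_symbol(text):
--     parenthesis_symbols = ")}]\"'"
--     if text in parenthesis_symbols:
--         return True
--     return False
--
-- def get_possible_variables(expressions):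
--     variables = list()
--     for expression in expressions:
--         assignment_pos = _get_asignment_pos(expression)
--         if assignment_pos!=-1:
--             expression = expression[:assignment_pos]
--         current_var = ""
--         last_symbol = ""
--         for c in expression+" ":
--             if _is_not_var_symbol(c):
--                 if _is_valid_variable(current_var) and last_symbol!="." and not iskeyword(current_var):
--                     variables.append(current_var)
--                 current_var = ""
--                 last_symbol = c
--             else:
--                 current_var += c
--     return variables
-- ===== SOURCE B (Python) =====
-- # B: two-pointer index tokenizer over the truncated string, with a staged
-- # levels-list + linear index search for the assignment position, instead of
-- # A's char-by-char current_var/last_symbol accumulator state machine.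
-- _KEYWORDS = frozenset((
--     'False', 'None', 'True', 'and', 'as', 'assert', 'async', 'await', 'break',
--     'class', 'continue', 'def', 'del', 'elif', 'else', 'except', 'finally',
--     'for', 'from', 'global', 'if', 'import', 'in', 'is', 'lambda', 'nonlocal',
--     'not', 'or', 'pass', 'raise', 'return', 'try', 'while', 'with', 'yield'))
--
-- _DELIMS = frozenset(".,!@#$%^/&*()-+={}[]:\t=<> ")
-- _OPEN = frozenset("({[\"'")
-- _CLOSE = frozenset(")}]\"'")
-- _MATH = frozenset("<>=!")
--
--
-- def _assignment_pos(text):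
--     n = len(text)
--     levels = []
--     a = 0
--     for c in text:
--         a += (c in _OPEN) - (c in _CLOSE)
--         levels.append(a)
--     for i in range(n):
--         if (levels[i] == 0 and text[i] == '=' and 0 < i < n - 1
--                 and text[i - 1] not in _MATH and text[i + 1] != '='):
--             return i
--     return -1
--
--
-- def get_possible_variables(expressions):
--     variables = []
--     for expression in expressions:
--         pos = _assignment_pos(expression)
--         s = expression if pos == -1 else expression[:pos]
--         n = len(s)
--         i = 0
--         while i < n:
--             if s[i] in _DELIMS:
--                 i += 1
--                 continue
--             j = i
--             while j < n and s[j] not in _DELIMS: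
--                 j += 1
--             tok = s[i:j]
--             if tok not in _KEYWORDS and (i == 0 or s[i - 1] != '.'):
--                 variables.append(tok)
--             i = j
--     return variables
-- ===== Notes on version B (the rewrite author's own statement) =====
-- stated objective: alternative
-- what changed: Replaces A's char-by-char current_var/last_symbol accumulator state machine by a two-pointer index tokenizer over the truncated string (checking the character before each token start directly), and the assignment-position scan by a staged levels-list plus a linear index search.
import Mathlib
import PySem

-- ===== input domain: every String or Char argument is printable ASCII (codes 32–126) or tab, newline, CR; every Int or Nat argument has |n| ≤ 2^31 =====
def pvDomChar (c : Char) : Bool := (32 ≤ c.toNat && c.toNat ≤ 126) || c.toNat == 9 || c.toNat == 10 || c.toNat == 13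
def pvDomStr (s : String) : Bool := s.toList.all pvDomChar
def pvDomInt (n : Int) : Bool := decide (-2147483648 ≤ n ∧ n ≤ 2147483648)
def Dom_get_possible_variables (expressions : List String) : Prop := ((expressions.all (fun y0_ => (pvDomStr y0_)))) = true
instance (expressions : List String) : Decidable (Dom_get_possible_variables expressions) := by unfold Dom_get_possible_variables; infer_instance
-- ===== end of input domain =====

-- B replaces A's char-by-char current_var/last_symbol accumulator state machine by a
-- two-pointer index tokenizer plus a staged levels-list assignment-position search; objective: alternative.

-- ===== PORT A =====
def pvIskeyword (tok : List Char) : Bool :=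
  ["False", "None", "True", "and", "as", "assert", "async", "await", "break", "class",
   "continue", "def", "del", "elif", "else", "except", "finally", "for", "from", "global",
   "if", "import", "in", "is", "lambda", "nonlocal", "not", "or", "pass", "raise",
   "return", "try", "while", "with", "yield"].contains (String.ofList tok)

def pvIsMathSymbol (c : Char) : Bool := ("<>=!".toList).contains c

def pvIsNotVarSymbol (c : Char) : Bool := (".,!@#$%^/&*()-+={}[]:\t=<> ".toList).contains c

def pvIsLeftParen (c : Char) : Bool := ("({[\"'".toList).contains c

def pvIsRightParen (c : Char) : Bool := (")}]\"'".toList).contains c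

-- _get_asignment_pos: scan with level counter; prev = text[pos-1], rest.head? = text[pos+1]
def pvAssignGo : List Char → Int → Nat → Option Char → Int
  | [], _, _, _ => -1
  | c :: rest, level, pos, prev =>
      let level := level + (if pvIsLeftParen c then 1 else 0)
      let level := level - (if pvIsRightParen c then 1 else 0)
      if level == 0 && c == '=' && pos > 0 &&
         !(match prev with | some p => pvIsMathSymbol p | none => false) &&
         (match rest with | c' :: _ => c' != '=' | [] => false) then
        (pos : Int)
      else
        pvAssignGo rest level (pos + 1) (some c)

def pvGetAssignmentPos (text : List Char) : Int := pvAssignGo text 0 0 none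

-- expression[:assignment_pos] when assignment_pos != -1 (the pos is then nonnegative)
def pvTruncate (e : String) : List Char :=
  let pos := pvGetAssignmentPos e.toList
  if pos != -1 then e.toList.take pos.toNat else e.toList

def pvIsValidVariable (text : List Char) : Bool :=
  if text.length == 0 then false else text.all (fun c => !pvIsNotVarSymbol c)

-- A's inner loop over expression+" " with state (current_var, last_symbol, variables)
def pvLoopA : List Char → List Char → List Char → List String → List String
  | [], _, _, acc => acc
  | c :: cs, cur, last, acc =>
      if pvIsNotVarSymbol c then
        pvLoopA cs [] [c]
          (acc ++ (if pvIsValidVariable cur && last != ['.'] && !pvIskeyword cur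
                   then [String.ofList cur] else []))
      else
        pvLoopA cs (cur ++ [c]) last acc

def get_possible_variables (expressions : List String) : List String :=
  expressions.foldl (fun vars e => pvLoopA (pvTruncate e ++ [' ']) [] [] vars) []

-- ===== PORT B =====
-- frozenset membership tests written as explicit character comparisons
def pvDelimB (c : Char) : Bool :=
  c == '.' || c == ',' || c == '!' || c == '@' || c == '#' || c == '$' || c == '%' ||
  c == '^' || c == '/' || c == '&' || c == '*' || c == '(' || c == ')' || c == '-' ||
  c == '+' || c == '=' || c == '{' || c == '}' || c == '[' || c == ']' || c == ':' ||
  c == '\t' || c == '<' || c == '>' || c == ' '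

def pvOpenB (c : Char) : Bool := c == '(' || c == '{' || c == '[' || c == '"' || c == '\''

def pvCloseB (c : Char) : Bool := c == ')' || c == '}' || c == ']' || c == '"' || c == '\''

def pvMathB (c : Char) : Bool := c == '<' || c == '>' || c == '=' || c == '!'

def pvKeywordB (tok : List Char) : Bool :=
  ["False", "None", "True", "and", "as", "assert", "async", "await", "break", "class",
   "continue", "def", "del", "elif", "else", "except", "finally", "for", "from", "global",
   "if", "import", "in", "is", "lambda", "nonlocal", "not", "or", "pass", "raise",
   "return", "try", "while", "with", "yield"].any (fun k => k == String.ofList tok)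

-- (c in _OPEN) - (c in _CLOSE)
def pvDeltaB (c : Char) : Int := (if pvOpenB c then 1 else 0) - (if pvCloseB c then 1 else 0)

-- the running-sum levels list (Python's append loop)
def pvAccLevels : Int → List Char → List Int
  | _, [] => []
  | a, c :: cs => (a + pvDeltaB c) :: pvAccLevels (a + pvDeltaB c) cs

-- the condition of B's index search (guards 0 < i, i < n-1 precede the indexing)
def pvPredB (t : List Char) (i : Nat) : Bool :=
  ((pvAccLevels 0 t).getD i 0 == 0) && (t.getD i ' ' == '=') &&
  decide (0 < i) && decide (i < t.length - 1) &&
  !pvMathB (t.getD (i - 1) ' ') && (t.getD (i + 1) ' ' != '=')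

def pvAssignPosB (t : List Char) : Int :=
  match (List.range t.length).find? (pvPredB t) with
  | some i => (i : Int)
  | none => -1

def pvTruncB (e : String) : List Char :=
  let pos := pvAssignPosB e.toList
  if pos == -1 then e.toList else e.toList.take pos.toNat

-- the two-pointer loop: skip a delimiter, or slice out the maximal run starting at i
def pvTokScan (t : List Char) : List Char → Nat → List String
  | [], _ => []
  | c :: cs, i =>
      if pvDelimB c then pvTokScan t cs (i + 1)
      else
        let run := c :: cs.takeWhile (fun x => !pvDelimB x)
        (if !pvKeywordB run && (i == 0 || t.getD (i - 1) ' ' != '.')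
         then [String.ofList run] else []) ++
        pvTokScan t (cs.dropWhile (fun x => !pvDelimB x)) (i + run.length)
termination_by rest _ => rest.length
decreasing_by
  · simp
  · simp only [List.length_cons]
    exact Nat.lt_succ_of_le (List.length_dropWhile_le _ cs)

def get_possible_variables_alt (expressions : List String) : List String :=
  expressions.foldl (fun vars e =>
    let s := pvTruncB e
    vars ++ pvTokScan s s 0) []

-- ===== PRECONDITION & SPEC =====
def Spec_get_possible_variables (expressions : List String) (out : List String) : Prop := out = get_possible_variables_alt expressions
instance (expressions : List String) (out : List String) : Decidable (Spec_get_possible_variables expressions out) := by unfold Spec_get_possible_variables; infer_instance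

-- ===== CLAIM (what is proved, stated in full; the proofs are below) =====
def Claim_equal_get_possible_variables : Prop := ∀ (expressions : List String), Dom_get_possible_variables expressions → Spec_get_possible_variables expressions (get_possible_variables expressions)

-- ===== LEMMAS AND PROOFS =====

-- character-class bridges between A's string-membership helpers and B's comparison chains
lemma pvLeft_eq (c : Char) : pvIsLeftParen c = pvOpenB c := by
  unfold pvIsLeftParen pvOpenB
  rw [show "({[\"'".toList = ['(','{','[','"','\''] from by decide]
  simp [Bool.or_comm, Bool.or_assoc, Bool.or_left_comm, beq_eq_decide]

lemma pvRight_eq (c : Char) : pvIsRightParen c = pvCloseB c := by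
  unfold pvIsRightParen pvCloseB
  rw [show ")}]\"'".toList = [')','}',']','"','\''] from by decide]
  simp [Bool.or_comm, Bool.or_assoc, Bool.or_left_comm, beq_eq_decide]

lemma pvMath_eq (c : Char) : pvIsMathSymbol c = pvMathB c := by
  unfold pvIsMathSymbol pvMathB
  rw [show "<>=!".toList = ['<','>','=','!'] from by decide]
  simp [Bool.or_comm, Bool.or_assoc, Bool.or_left_comm, beq_eq_decide]

lemma pvDelim_eq (c : Char) : pvIsNotVarSymbol c = pvDelimB c := by
  unfold pvIsNotVarSymbol pvDelimB
  rw [show ".,!@#$%^/&*()-+={}[]:\t=<> ".toList =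
      ['.',',','!','@','#','$','%','^','/','&','*','(',')','-','+','=','{','}','[',']',':','\t','=','<','>',' '] from by decide]
  simp only [List.contains_cons, List.contains_nil, Bool.or_false, beq_eq_decide]
  by_cases h : c = '=' <;> simp [h, Bool.or_comm, Bool.or_assoc, Bool.or_left_comm]

lemma pvKw_eq (l : List Char) : pvIskeyword l = pvKeywordB l := by
  unfold pvIskeyword pvKeywordB
  simp only [List.contains_cons, List.any_cons, List.any_nil, List.contains_nil, BEq.comm]

-- getD through drop
lemma pvGetD_drop {α : Type} (l : List α) (k : Nat) (d : α) : l.getD k d = (l.drop k).getD 0 d := by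
  simp [List.getD_eq_getElem?_getD, List.getElem?_drop]

-- ---------- assignment position: A's scan = B's levels + index search ----------

lemma pvGoFindAux : ∀ (m : Nat) (t : List Char) (k : Nat) (a : Int) (prev : Option Char),
    t.length - k = m →
    pvAccLevels a (t.drop k) = (pvAccLevels 0 t).drop k →
    (k = 0 → prev = none) →
    (0 < k → prev = some (t.getD (k - 1) ' ')) →
    pvAssignGo (t.drop k) a k prev =
      (match (List.range' k (t.length - k)).find? (pvPredB t) with
       | some i => (i : Int) | none => -1) := by
  intro m
  induction m with
  | zero =>
      intro t k a prev hm _ _ _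
      have hk : t.length ≤ k := by omega
      rw [List.drop_eq_nil_of_le hk]
      rw [show t.length - k = 0 from by omega]
      simp [pvAssignGo, List.range']
  | succ m ih =>
      intro t k a prev hm hlev h0 hpos
      have hk : k < t.length := by omega
      have hdk : t.drop k = t[k] :: t.drop (k + 1) := List.drop_eq_getElem_cons hk
      rw [hdk] at hlev
      rw [pvAccLevels] at hlev
      have hLk : (pvAccLevels 0 t).getD k 0 = a + pvDeltaB t[k] := by
        rw [pvGetD_drop, ← hlev]; rfl
      have hlev' : pvAccLevels (a + pvDeltaB t[k]) (t.drop (k + 1)) = (pvAccLevels 0 t).drop (k + 1) := by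
        have := congrArg List.tail hlev
        simpa [List.tail_drop] using this
      have hck : t.getD k ' ' = t[k] := List.getD_eq_getElem t ' ' hk
      have hδ : ∀ b : Int, b + (if pvIsLeftParen t[k] then (1:Int) else 0) - (if pvIsRightParen t[k] then (1:Int) else 0)
          = b + pvDeltaB t[k] := by
        intro b; rw [pvLeft_eq, pvRight_eq]; unfold pvDeltaB; ring
      have h5 : (match t.drop (k + 1) with | c' :: _ => c' != '=' | [] => false)
          = (decide (k < t.length - 1) && (t.getD (k + 1) ' ' != '=')) := by
        by_cases hk1 : k + 1 < t.length
        · have hlt : k < t.length - 1 := by omega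
          rw [List.drop_eq_getElem_cons hk1, List.getD_eq_getElem t ' ' hk1]
          simp [hlt]
        · have hge : ¬ k < t.length - 1 := by omega
          rw [List.drop_eq_nil_of_le (by omega)]
          simp [hge]
      have hIH := ih t (k + 1) (a + pvDeltaB t[k]) (some t[k]) (by omega) hlev'
        (by omega) (by intro _; show some t[k] = some (t.getD k ' '); rw [hck])
      rw [show t.length - (k + 1) = m from by omega] at hIH
      by_cases hk0 : k = 0
      · subst hk0
        have hpn := h0 rfl
        subst hpn
        have hcond : pvPredB t 0 = false := by
          unfold pvPredB; simp
        rw [hdk]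
        simp only [pvAssignGo]
        rw [show t.length - 0 = m + 1 from hm, List.range'_succ,
          List.find?_cons_of_neg (by simp [hcond])]
        rw [if_neg (by simp)]
        rw [hδ a, hIH]
      · have hkpos : 0 < k := Nat.pos_of_ne_zero hk0
        have hpn := hpos hkpos
        subst hpn
        have hcond : (((a + (if pvIsLeftParen t[k] then (1:Int) else 0) - (if pvIsRightParen t[k] then (1:Int) else 0)) == 0) &&
             (t[k] == '=') && decide (k > 0) &&
             !(pvIsMathSymbol (t.getD (k - 1) ' ')) &&
             (match t.drop (k + 1) with | c' :: _ => c' != '=' | [] => false))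
            = pvPredB t k := by
          unfold pvPredB
          rw [hδ, hLk, hck, h5, pvMath_eq]
          simp only [hkpos, decide_true, Bool.and_true]
          by_cases hz : (a + pvDeltaB t[k] == 0) = true <;>
            by_cases he : (t[k] == '=') = true <;>
              by_cases hw : pvMathB (t.getD (k - 1) ' ') = true <;>
                simp [hz, he, Bool.and_assoc, Bool.and_comm, Bool.and_left_comm]
        rw [hdk]
        simp only [pvAssignGo]
        rw [hcond]
        rw [show t.length - k = m + 1 from hm, List.range'_succ]
        by_cases hp : pvPredB t k = true
        · rw [List.find?_cons_of_pos hp, if_pos hp]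
        · rw [List.find?_cons_of_neg (by simp [hp]), if_neg (by simp [hp])]
          rw [hδ a, hIH]

lemma pvAssignPos_eq (t : List Char) : pvGetAssignmentPos t = pvAssignPosB t := by
  unfold pvGetAssignmentPos pvAssignPosB
  have := pvGoFindAux (t.length) t 0 0 none (by omega) (by simp) (fun _ => rfl) (by omega)
  simpa [List.range_eq_range'] using this

lemma pvTrunc_eq (e : String) : pvTruncate e = pvTruncB e := by
  unfold pvTruncate pvTruncB
  rw [pvAssignPos_eq]
  by_cases h : pvAssignPosB e.toList = -1 <;> simp [h]

-- ---------- tokenizer: A's state machine = B's two-pointer scan ----------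

-- accumulator-free form of A's inner loop
def pvBres : List Char → List Char → List Char → List String
  | [], _, _ => []
  | c :: cs, cur, last =>
      if pvIsNotVarSymbol c then
        (if pvIsValidVariable cur && last != ['.'] && !pvIskeyword cur
         then [String.ofList cur] else []) ++ pvBres cs [] [c]
      else
        pvBres cs (cur ++ [c]) last

lemma pvLoopA_acc : ∀ (cs cur last : List Char) (acc : List String),
    pvLoopA cs cur last acc = acc ++ pvBres cs cur last := by
  intro cs
  induction cs with
  | nil => intro cur last acc; simp [pvLoopA, pvBres]
  | cons c cs ih =>
      intro cur last acc
      simp only [pvLoopA, pvBres]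
      by_cases h : pvIsNotVarSymbol c = true
      · simp [h, ih, List.append_assoc]
      · simp [h, ih]

-- consuming a run of non-delimiter characters just extends cur
lemma pvBres_run : ∀ (run rest cur last : List Char),
    (∀ c ∈ run, pvIsNotVarSymbol c = false) →
    pvBres (run ++ rest) cur last = pvBres rest (cur ++ run) last := by
  intro run
  induction run with
  | nil => intro rest cur last _; simp
  | cons c run ih =>
      intro rest cur last h
      have hc : pvIsNotVarSymbol c = false := h c (by simp)
      simp only [List.cons_append, pvBres, hc, Bool.false_eq_true, if_false]
      rw [ih rest (cur ++ [c]) last (fun x hx => h x (by simp [hx]))]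
      simp

lemma pvValid_run (run : List Char) (hne : run ≠ [])
    (hall : ∀ c ∈ run, pvIsNotVarSymbol c = false) : pvIsValidVariable run = true := by
  cases run with
  | nil => exact absurd rfl hne
  | cons c cs =>
      unfold pvIsValidVariable
      simp only [List.length_cons]
      have : ∀ x ∈ c :: cs, (!pvIsNotVarSymbol x) = true := by
        intro x hx; simp [hall x hx]
      simp [List.all_eq_true.mpr this]

-- the flush of one token: A's last_symbol test = B's previous-character test
lemma pvEmit_eq (t run last : List Char) (k : Nat)
    (hne : run ≠ []) (hall : ∀ c ∈ run, pvIsNotVarSymbol c = false)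
    (h0 : k = 0 → last = []) (hpos : 0 < k → last = [t.getD (k - 1) ' ']) :
    (if pvIsValidVariable run && last != ['.'] && !pvIskeyword run
     then [String.ofList run] else [])
    = (if !pvKeywordB run && (k == 0 || t.getD (k - 1) ' ' != '.')
       then [String.ofList run] else []) := by
  rw [pvValid_run run hne hall, pvKw_eq]
  by_cases hk0 : k = 0
  · subst hk0; rw [h0 rfl]; simp
  · have hkpos : 0 < k := Nat.pos_of_ne_zero hk0
    rw [hpos hkpos]
    simp [hk0, Bool.and_comm]

lemma pvTokScan_nil (t : List Char) (i : Nat) : pvTokScan t [] i = [] := by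
  rw [pvTokScan.eq_def]

lemma pvTokScan_delim (t : List Char) (c : Char) (cs : List Char) (i : Nat)
    (hd : pvDelimB c = true) : pvTokScan t (c :: cs) i = pvTokScan t cs (i + 1) := by
  rw [pvTokScan.eq_def]
  simp [hd]

lemma pvTokScan_tok (t : List Char) (c : Char) (cs : List Char) (i : Nat)
    (hd : pvDelimB c = false) :
    pvTokScan t (c :: cs) i =
      (if !pvKeywordB (c :: cs.takeWhile (fun x => !pvDelimB x)) && (i == 0 || t.getD (i - 1) ' ' != '.')
       then [String.ofList (c :: cs.takeWhile (fun x => !pvDelimB x))] else []) ++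
      pvTokScan t (cs.dropWhile (fun x => !pvDelimB x)) (i + (c :: cs.takeWhile (fun x => !pvDelimB x)).length) := by
  rw [pvTokScan.eq_def]
  simp [hd]

lemma pvTokBridge : ∀ (m : Nat) (t : List Char) (k : Nat) (last : List Char),
    t.length - k = m →
    (k = 0 → last = []) →
    (0 < k → last = [t.getD (k - 1) ' ']) →
    pvBres (t.drop k ++ [' ']) [] last = pvTokScan t (t.drop k) k := by
  intro m
  induction m using Nat.strong_induction_on with
  | _ m ih =>
      intro t k last hm h0 hpos
      rcases Nat.eq_zero_or_pos m with hm0 | hmpos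
      · subst hm0
        rw [List.drop_eq_nil_of_le (by omega), pvTokScan_nil]
        simp [pvBres, pvIsValidVariable, show pvIsNotVarSymbol ' ' = true from by decide]
      · have hk : k < t.length := by omega
        have hdk : t.drop k = t[k] :: t.drop (k + 1) := List.drop_eq_getElem_cons hk
        have hck : t.getD k ' ' = t[k] := List.getD_eq_getElem t ' ' hk
        rw [hdk]
        by_cases hd : pvIsNotVarSymbol t[k] = true
        · -- a delimiter: skip
          simp only [List.cons_append, pvBres, hd, if_pos, pvIsValidVariable]
          rw [pvTokScan_delim t _ _ _ (by rw [← pvDelim_eq]; exact hd)]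
          rw [← ih (m - 1) (by omega) t (k + 1) [t[k]] (by omega) (by omega)
              (by intro _; rw [show k + 1 - 1 = k from rfl, hck])]
          simp
        · -- start of a token
          have hd' : pvIsNotVarSymbol t[k] = false := by
            cases h : pvIsNotVarSymbol t[k]
            · rfl
            · exact absurd h hd
          have hdB : pvDelimB t[k] = false := by rw [← pvDelim_eq]; exact hd'
          rw [pvTokScan_tok t _ _ _ hdB]
          set cs := t.drop (k + 1) with hcs
          set run : List Char := t[k] :: cs.takeWhile (fun x => !pvDelimB x) with hrun
          set rest : List Char := cs.dropWhile (fun x => !pvDelimB x) with hrest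
          have hsplit : t[k] :: cs = run ++ rest := by
            rw [hrun, hrest]; simp [List.takeWhile_append_dropWhile]
          have hallrun : ∀ c ∈ run, pvIsNotVarSymbol c = false := by
            intro c hc
            rw [hrun] at hc
            rcases List.mem_cons.mp hc with h | h
            · subst h; exact hd'
            · have := List.mem_takeWhile_imp h
              rw [pvDelim_eq]
              simpa using this
          have hdropk : t.drop (k + run.length) = rest := by
            have h1 : t.drop (k + run.length) = (t.drop k).drop run.length := by
              rw [List.drop_drop]; try ring_nf
            rw [h1, hdk, hsplit]
            simp
          have hrunne : run ≠ [] := by rw [hrun]; simp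
          rw [hsplit, List.append_assoc, pvBres_run run (rest ++ [' ']) [] last hallrun,
            List.nil_append]
          cases hr : rest with
          | nil =>
              -- the token runs to the end of the string; the sentinel blank flushes it
              have hsp : pvIsNotVarSymbol ' ' = true := by decide
              simp only [List.nil_append, pvBres, hsp, if_pos]
              rw [pvTokScan_nil]
              simp only [List.append_nil]
              exact pvEmit_eq t run last k hrunne hallrun h0 hpos
          | cons d rest' =>
              have hdd : pvIsNotVarSymbol d = true := by
                rw [pvDelim_eq]
                have : (fun x => !pvDelimB x) d = false := by
                  have := List.head_dropWhile_not (fun x => !pvDelimB x) (l := cs) (by rw [← hrest, hr]; simp)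
                  simpa [← hrest, hr] using this
                simpa using this
              simp only [List.cons_append, pvBres, hdd, if_pos]
              rw [pvEmit_eq t run last k hrunne hallrun h0 hpos]
              have hklen : k + run.length < t.length := by
                by_contra hge
                rw [List.drop_eq_nil_of_le (by omega)] at hdropk
                rw [hr] at hdropk; cases hdropk
              have hcons : rest = t[k + run.length] :: t.drop (k + run.length + 1) :=
                hdropk ▸ List.drop_eq_getElem_cons hklen
              rw [hr] at hcons
              injection hcons with hc1 hc2
              have hdval : t.getD (k + run.length) ' ' = d := by
                rw [List.getD_eq_getElem t ' ' hklen, ← hc1]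
              have hdrop' : t.drop (k + run.length + 1) = rest' := hc2.symm
              have hih := ih (t.length - (k + run.length + 1)) (by omega) t
                  (k + run.length + 1) [d] rfl (by omega)
                  (by intro _; rw [show k + run.length + 1 - 1 = k + run.length from rfl, hdval])
              rw [hdrop'] at hih
              rw [hih]
              rw [pvTokScan_delim t d rest' _ (by rw [← pvDelim_eq]; exact hdd)]

-- one expression
lemma pvExpr_eq (e : String) (vars : List String) :
    pvLoopA (pvTruncate e ++ [' ']) [] [] vars = vars ++ pvTokScan (pvTruncB e) (pvTruncB e) 0 := by
  rw [pvLoopA_acc, pvTrunc_eq]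
  congr 1
  have := pvTokBridge ((pvTruncB e).length) (pvTruncB e) 0 [] (by omega) (fun _ => rfl) (by omega)
  simpa using this

-- ===== VERDICT (by name: the statement is the Claim_ definition above) =====
theorem get_possible_variables_spec : Claim_equal_get_possible_variables := by
  intro es _
  show get_possible_variables es = get_possible_variables_alt es
  unfold get_possible_variables get_possible_variables_alt
  rw [show (fun (vars : List String) (e : String) => pvLoopA (pvTruncate e ++ [' ']) [] [] vars)
      = (fun (vars : List String) (e : String) => vars ++ pvTokScan (pvTruncB e) (pvTruncB e) 0)
    from funext fun vars => funext fun e => pvExpr_eq e vars]
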